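-- pv_equiv track=rewrite | github.com/Kobzol/debug-visualizer | debugger/mi/mi_parser.py | _remove_array_labels
-- ===== SOURCE A (Python) =====
-- def _remove_array_labels(data):
--     in_array = []
--
--     i = 0
--     in_quote = False
--
--     while i < len(data):
--         char = data[i]
--
--         if char == "\"":
--             in_quote = not in_quote
--
--         if not in_quote:
--             if char == "[":
--                 in_array.append(1)
--             if char == "{":
--                 in_array.append(0)
--             if char in ("]", "}"):
--                 in_array.pop()
--
--             if len(in_array) > 0 and in_array[len(in_array) - 1] == 1:
--                 j = i
--                 while j < len(data) and (data[j].isalpha() or data[j] == "="):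
--                     j += 1
--
--                 if j > i:
--                     changed_str = list(data)
--                     changed_str[i:j] = " " * (j - i)
--                     data = "".join(changed_str)
--                     i += (j - i - 1)
--
--         i += 1
--
--     return data
-- ===== SOURCE B (Python) =====
-- def _remove_array_labels(data):
--     out = []
--     stack = []
--     in_quote = False
--     for char in data:
--         if char == "\"":
--             in_quote = not in_quote
--         if not in_quote:
--             if char == "[":
--                 stack.append(1)
--             elif char == "{":
--                 stack.append(0)
--             elif char in ("]", "}"):
--                 stack.pop()
--         if not in_quote and stack and stack[-1] == 1 and (char.isalpha() or char == "="):
--             out.append(" ")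
--         else:
--             out.append(char)
--     return "".join(out)
-- ===== Notes on version B (the rewrite author's own statement) =====
-- stated objective: simpler
-- what changed: Replaced A's inner run-scanning while-loop and repeated whole-string list/join rebuilds (with index jumping) by a single flat forward pass that decides per character whether to emit a space or the character and joins once at the end.
import Mathlib
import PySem

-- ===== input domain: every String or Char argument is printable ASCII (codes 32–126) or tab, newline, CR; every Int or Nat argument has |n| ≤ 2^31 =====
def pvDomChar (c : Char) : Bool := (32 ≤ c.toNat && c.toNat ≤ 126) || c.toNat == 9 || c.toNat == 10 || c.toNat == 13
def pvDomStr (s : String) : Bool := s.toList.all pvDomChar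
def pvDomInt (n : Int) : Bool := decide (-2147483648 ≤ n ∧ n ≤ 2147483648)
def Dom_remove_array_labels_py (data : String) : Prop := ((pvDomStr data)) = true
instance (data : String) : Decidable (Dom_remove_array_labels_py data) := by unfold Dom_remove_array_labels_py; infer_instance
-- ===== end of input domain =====

-- B replaces A's inner run-scanning loop and repeated whole-string rebuilds by a single flat
-- character-emitting pass (objective: simpler); return-value equivalence on inputs where A does
-- not raise (both A and B raise IndexError on an unmatched unquoted closing bracket).

-- ===== PORT A =====

-- `data[j].isalpha() or data[j] == "="` (exact on the ASCII domain)
def pvIsAE (c : Char) : Bool := c.isAlpha || c == '='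

-- inner `while j < len(data) and (data[j].isalpha() or data[j] == "=")` loop of A
def pvRunEnd (data : List Char) (j : Nat) : Nat :=
  if h : j < data.length then
    if pvIsAE data[j] then pvRunEnd data (j + 1) else j
  else j
termination_by data.length - j
decreasing_by omega

theorem pvRunEnd_le (data : List Char) (j : Nat) (hj : j ≤ data.length) :
    pvRunEnd data j ≤ data.length := by
  fun_induction pvRunEnd data j with
  | case1 j h hAE ih => exact ih (by omega)
  | case2 j h hAE => exact hj
  | case3 j h => exact hj

-- the outer `while i < len(data)` loop of A; `data` is reassigned on blanking, `i` jumps to j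
-- (i += (j-i-1); i += 1).  Python's `in_array.pop()` raises on an empty list; `dropLast` on []
-- returns [] instead — those inputs are excluded by Pre_.
def pvALoop (data : List Char) (i : Nat) (stack : List Nat) (inq : Bool) : List Char :=
  if h : i < data.length then
    let c := data[i]
    let inq2 := if c == '"' then !inq else inq
    if inq2 then
      pvALoop data (i + 1) stack inq2
    else
      let st1 := if c == '[' then stack ++ [1] else stack
      let st2 := if c == '{' then st1 ++ [0] else st1
      let st3 := if c == ']' || c == '}' then st2.dropLast else st2
      if st3.getLast? == some 1 then
        let j := pvRunEnd data i
        if i < j then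
          pvALoop (data.take i ++ List.replicate (j - i) ' ' ++ data.drop j) j st3 inq2
        else
          pvALoop data (i + 1) st3 inq2
      else
        pvALoop data (i + 1) st3 inq2
  else
    data
termination_by data.length - i
decreasing_by
  · omega
  · have h1 : pvRunEnd data i ≤ data.length := pvRunEnd_le data i (by omega)
    simp only [List.length_append, List.length_take, List.length_replicate, List.length_drop]
    omega
  · omega
  · omega

def remove_array_labels_py (data : String) : String :=
  String.ofList (pvALoop data.toList 0 [] false)

-- ===== PORT B =====

-- one step of Source B's for-loop: toggle quote, update the bracket stack (elif chain), emit one char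
def pvBStep (acc : List Char × List Nat × Bool) (c : Char) : List Char × List Nat × Bool :=
  let out := acc.1
  let stack := acc.2.1
  let inq := acc.2.2
  let inq2 := if c == '"' then !inq else inq
  let stack2 :=
    if inq2 then stack
    else if c == '[' then stack ++ [1]
    else if c == '{' then stack ++ [0]
    else if c == ']' || c == '}' then stack.dropLast
    else stack
  let out2 := if !inq2 && (stack2.getLast? == some 1) && pvIsAE c then out ++ [' '] else out ++ [c]
  (out2, stack2, inq2)

def remove_array_labels_py_alt (data : String) : String :=
  String.ofList (data.toList.foldl pvBStep (([] : List Char), ([] : List Nat), false)).1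

-- ===== PRECONDITION & SPEC =====
-- Pre_ excludes exactly the inputs with an unquoted closing bracket at unquoted-bracket depth 0,
-- on which Python A raises IndexError (pop from empty list); Python B raises there identically.
def pvPreStep (acc : Bool × Nat × Bool) (c : Char) : Bool × Nat × Bool :=
  let ok := acc.1
  let depth := acc.2.1
  let inq := acc.2.2
  let inq2 := if c == '"' then !inq else inq
  if inq2 then (ok, depth, inq2)
  else if c == '[' || c == '{' then (ok, depth + 1, inq2)
  else if c == ']' || c == '}' then
    (if depth = 0 then (false, 0, inq2) else (ok, depth - 1, inq2))
  else (ok, depth, inq2)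

def Pre_remove_array_labels_py (data : String) : Prop :=
  (data.toList.foldl pvPreStep (true, 0, false)).1 = true
instance (data : String) : Decidable (Pre_remove_array_labels_py data) := by
  unfold Pre_remove_array_labels_py; infer_instance

def pvWitness_remove_array_labels_py : String := "[a={x=\"1\"}]"

def Spec_remove_array_labels_py (data : String) (out : String) : Prop := out = remove_array_labels_py_alt data
instance (data : String) (out : String) : Decidable (Spec_remove_array_labels_py data out) := by unfold Spec_remove_array_labels_py; infer_instance

-- ===== CLAIM (what is proved, stated in full; the proofs are below) =====
def Claim_equal_remove_array_labels_py : Prop := ∀ (data : String), Dom_remove_array_labels_py data → Pre_remove_array_labels_py data → Spec_remove_array_labels_py data (remove_array_labels_py data)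

-- ===== LEMMAS AND PROOFS =====

theorem pvDropWhile_eq (p : Char → Bool) (l : List Char) :
    l.dropWhile p = l.drop (l.takeWhile p).length := by
  induction l with
  | nil => simp
  | cons a t ih =>
    by_cases h : p a <;> simp [h, ih]

-- recursive view of B's fold (proof helper)
def pvBGo : List Char → List Nat → Bool → List Char
  | [], _, _ => []
  | c :: rest, stack, inq =>
    let inq2 := if c == '"' then !inq else inq
    let stack2 :=
      if inq2 then stack
      else if c == '[' then stack ++ [1]
      else if c == '{' then stack ++ [0]
      else if c == ']' || c == '}' then stack.dropLast
      else stack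
    (if !inq2 && (stack2.getLast? == some 1) && pvIsAE c then ' ' else c) :: pvBGo rest stack2 inq2

theorem pvFoldl_bStep (l : List Char) (out : List Char) (stack : List Nat) (inq : Bool) :
    (l.foldl pvBStep (out, stack, inq)).1 = out ++ pvBGo l stack inq := by
  induction l generalizing out stack inq with
  | nil => simp [pvBGo]
  | cons c rest ih =>
    simp only [List.foldl_cons, pvBStep, pvBGo]
    split_ifs <;> simp_all

theorem pvIsAE_ne (c : Char) (h : pvIsAE c = true) :
    (c == '"') = false ∧ (c == '[') = false ∧ (c == '{') = false ∧
    (c == ']') = false ∧ (c == '}') = false := by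
  refine ⟨?_, ?_, ?_, ?_, ?_⟩ <;>
  · rw [beq_eq_false_iff_ne]
    intro hc
    subst hc
    simp [pvIsAE, Char.isAlpha, Char.isUpper, Char.isLower] at h

theorem pvRunEnd_eq (data : List Char) (i : Nat) :
    pvRunEnd data i = i + ((data.drop i).takeWhile pvIsAE).length := by
  fun_induction pvRunEnd data i with
  | case1 j h hAE ih =>
    rw [List.drop_eq_getElem_cons h, List.takeWhile_cons, if_pos hAE]
    simp only [List.length_cons]
    omega
  | case2 j h hAE =>
    rw [List.drop_eq_getElem_cons h, List.takeWhile_cons, if_neg (by simp [hAE])]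
    simp
  | case3 j h =>
    rw [List.drop_eq_nil_of_le (by omega)]
    simp

-- over a run of alpha/'=' chars with top-of-stack 1 and quote off, B emits spaces and keeps state
theorem pvBGo_run (seg rest : List Char) (stack : List Nat)
    (hseg : ∀ c ∈ seg, pvIsAE c = true) (htop : stack.getLast? = some 1) :
    pvBGo (seg ++ rest) stack false = List.replicate seg.length ' ' ++ pvBGo rest stack false := by
  induction seg with
  | nil => simp
  | cons c seg' ih =>
    have hc : pvIsAE c = true := hseg c (by simp)
    obtain ⟨h1, h2, h3, h4, h5⟩ := pvIsAE_ne c hc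
    have hstep : pvBGo (c :: (seg' ++ rest)) stack false
        = ' ' :: pvBGo (seg' ++ rest) stack false := by
      simp [pvBGo, h1, h2, h3, h4, h5, htop, hc]
    rw [List.cons_append, hstep, ih (fun c hm => hseg c (by simp [hm]))]
    simp [List.replicate_succ]

theorem pvMain (n : Nat) (data : List Char) (i : Nat) (stack : List Nat) (inq : Bool)
    (hn : data.length - i ≤ n) :
    pvALoop data i stack inq = data.take i ++ pvBGo (data.drop i) stack inq := by
  induction n generalizing data i stack inq with
  | zero =>
    have hi : ¬ i < data.length := by omega
    rw [pvALoop, dif_neg hi, List.drop_eq_nil_of_le (by omega),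
      List.take_of_length_le (by omega)]
    simp [pvBGo]
  | succ n ih =>
    by_cases hi : i < data.length
    · rw [pvALoop, dif_pos hi]
      simp only []
      have hdrop : data.drop i = data[i] :: data.drop (i + 1) := List.drop_eq_getElem_cons hi
      have htake : data.take (i + 1) = data.take i ++ [data[i]] := by
        rw [List.take_add_one]
        simp [List.getElem?_eq_getElem hi]
      set c := data[i] with hc
      clear_value c
      set inq2 := if c == '"' then !inq else inq with hinq2
      by_cases hq : inq2 = true
      · rw [if_pos hq, ih data (i + 1) stack inq2 (by omega), hdrop, htake]
        simp only [pvBGo, ← hinq2, hq, List.append_assoc, List.singleton_append]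
        simp
      · rw [if_neg hq]
        set st1 := if c == '[' then stack ++ [1] else stack with hst1
        set st2 := if c == '{' then st1 ++ [0] else st1 with hst2
        set st3 := if c == ']' || c == '}' then st2.dropLast else st2 with hst3
        clear_value st3 st2 st1
        -- B's elif-chain stack update equals A's if-chain update (when inq2 is false)
        have hstEq :
            (if inq2 = true then stack
             else if c == '[' then stack ++ [1]
             else if c == '{' then stack ++ [0]
             else if c == ']' || c == '}' then stack.dropLast
             else stack) = st3 := by
          rw [if_neg hq, hst3, hst2, hst1]
          by_cases h1 : c == '['
          · have : c = '[' := by exact beq_iff_eq.mp h1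
            subst this; simp
          · by_cases h2 : c == '{'
            · have : c = '{' := by exact beq_iff_eq.mp h2
              subst this; simp
            · simp only [h1, h2, Bool.false_eq_true, if_false]
        have hBGo : pvBGo (data.drop i) stack inq =
            (if !inq2 && (st3.getLast? == some 1) && pvIsAE c then ' ' else c)
              :: pvBGo (data.drop (i + 1)) st3 inq2 := by
          rw [hdrop]
          simp only [pvBGo, ← hinq2, hstEq]
        by_cases htop : st3.getLast? == some 1
        · rw [if_pos htop]
          set j := pvRunEnd data i with hj
          by_cases hij : i < j
          · rw [if_pos hij]
            -- the run seg = chars i..j-1, all alpha/'='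
            have hje := pvRunEnd_eq data i
            set seg := (data.drop i).takeWhile pvIsAE with hsegdef
            have hjlen : j = i + seg.length := by rw [hj, hje]
            have hseg : ∀ c' ∈ seg, pvIsAE c' = true := fun c' hm =>
              List.mem_takeWhile_imp hm
            have hsplit : data.drop i = seg ++ (data.drop i).dropWhile pvIsAE := by
              rw [hsegdef, List.takeWhile_append_dropWhile]
            have hjle : j ≤ data.length := pvRunEnd_le data i (by omega)
            have hdropj : data.drop j = (data.drop i).dropWhile pvIsAE := by
              have : (data.drop i).dropWhile pvIsAE = (data.drop i).drop seg.length := by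
                rw [hsegdef, pvDropWhile_eq]
              rw [this, List.drop_drop]
              congr 1
            -- c itself starts the run, hence is alpha/'=' and not '"' or a bracket
            have hcseg : pvIsAE c = true := by
              by_contra hcon
              have hF : pvIsAE c = false := by
                cases h' : pvIsAE c
                · rfl
                · exact absurd h' hcon
              have hnil : seg = [] := by
                rw [hsegdef, hdrop, List.takeWhile_cons, if_neg (by simp [hF])]
              rw [hnil] at hjlen
              simp at hjlen
              omega
            obtain ⟨h1, h2, h3, h4, h5⟩ := pvIsAE_ne c hcseg
            have hinqF : inq = false := by
              rw [hinq2, h1, if_neg (by simp)] at hq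
              simpa using hq
            have hinq2F : inq2 = false := by simpa using hq
            have hstack3 : st3 = stack := by
              rw [hst3, hst2, hst1, h2, h3]
              simp [h4, h5]
            -- A side: recurse on blanked string at j
            set data' := data.take i ++ List.replicate (j - i) ' ' ++ data.drop j with hdata'
            have hlen' : data'.length = data.length := by
              rw [hdata']
              simp only [List.length_append, List.length_take, List.length_replicate,
                List.length_drop]
              omega
            have htake' : data'.take j = data.take i ++ List.replicate (j - i) ' ' := by
              rw [hdata', List.take_append_of_le_length]
              · rw [List.take_of_length_le]
                simp only [List.length_append, List.length_take, List.length_replicate]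
                omega
              · simp only [List.length_append, List.length_take, List.length_replicate]
                omega
            have hdrop' : data'.drop j = data.drop j := by
              rw [hdata', List.drop_append_of_le_length]
              · rw [List.drop_of_length_le]
                · simp
                · simp only [List.length_append, List.length_take, List.length_replicate]
                  omega
              · simp only [List.length_append, List.length_take, List.length_replicate]
                omega
            rw [ih data' j st3 inq2 (by rw [hlen']; omega), htake', hdrop']
            -- B side: the run lemma
            rw [hinqF, hinq2F, hstack3, hsplit, ← hdropj,
              pvBGo_run seg (data.drop j) stack hseg (by simpa [hstack3] using beq_iff_eq.mp htop)]
            have : seg.length = j - i := by omega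
            rw [this]
            simp
          · -- j = i : data[i] is not alpha/'=' (else the run would be nonempty)
            rw [if_neg hij]
            have hje := pvRunEnd_eq data i
            have hAEc : pvIsAE c = false := by
              by_contra hcon
              have hcT : pvIsAE c = true := by
                cases h' : pvIsAE c
                · exact absurd h' hcon
                · rfl
              have hcons : (data.drop i).takeWhile pvIsAE
                  = c :: (data.drop (i + 1)).takeWhile pvIsAE := by
                rw [hdrop, List.takeWhile_cons, if_pos hcT]
              rw [hcons] at hje
              simp only [List.length_cons] at hje
              omega
            rw [ih data (i + 1) st3 inq2 (by omega), hBGo, htake]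
            rw [if_neg (by simp [hAEc])]
            simp
        · rw [if_neg htop, ih data (i + 1) st3 inq2 (by omega), hBGo, htake]
          rw [if_neg (by simp [htop])]
          simp
    · rw [pvALoop, dif_neg hi, List.drop_eq_nil_of_le (by omega),
        List.take_of_length_le (by omega)]
      simp [pvBGo]

-- ===== VERDICT (by name: the statement is the Claim_ definition above) =====
theorem remove_array_labels_py_spec : Claim_equal_remove_array_labels_py := by
  intro data _hdom _hpre
  unfold Spec_remove_array_labels_py remove_array_labels_py remove_array_labels_py_alt
  rw [pvMain data.toList.length data.toList 0 [] false (by omega),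
    pvFoldl_bStep data.toList [] [] false]
  simp
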